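-- pv_equiv track=rewrite | github.com/hanafathiyah/Daspro-Python | adding_function.py | is_tanggal_valid
-- ===== SOURCE A (Python) =====
-- def is_tanggal_valid(tanggal):
--
--     kata = ""
--     array_tanggal = []
--
--     for char in tanggal:
--         if char == "/":
--             array_tanggal.append(kata)
--             kata = ""
--         else:
--             kata += char
--     array_tanggal.append(kata)
--
--     # validasi format tanggal
--     if(len(array_tanggal) != 3):
--         return False
--
--     # validasi tanggal berupa integer
--     try:
--         tanggal_input = int(array_tanggal[0])
--         bulan_input = int(array_tanggal[1])
--         tahun_input = int(array_tanggal[2])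
--     except ValueError:
--         return False
--
--     is_kabisat = False
--     if(tahun_input % 4 == 0):
--         is_kabisat = True
--
--     is_bulan_genap = False
--     if(bulan_input % 2 == 0):
--         is_bulan_genap = True
--
--     # validasi tahun
--     if(tahun_input <= 0):
--         return False
--
--     # validasi bulan
--     if(bulan_input <= 0 or bulan_input > 12):
--         return False
--
--     # valdiasi tanggal
--     if(is_bulan_genap):
--         if(bulan_input == 2 and is_kabisat):
--             if(tanggal_input <= 0 or tanggal_input > 29):
--                 return False
--         elif(bulan_input == 2):
--             if(tanggal_input <= 0 or tanggal_input > 28):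
--                 return False
--         elif(bulan_input <= 7):
--             if(tanggal_input <= 0 or tanggal_input > 30):
--                 return False
--         else:
--             if(tanggal_input <= 0 or tanggal_input > 31):
--                 return False
--
--     else:
--         if(bulan_input <=7):
--             if(tanggal_input <= 0 or tanggal_input > 31):
--                 return False
--         else:
--             if(tanggal_input <= 0 or tanggal_input > 30):
--                 return False
--
--     return True
-- ===== SOURCE B (Python) =====
-- def is_tanggal_valid(tanggal):
--     parts = tanggal.split("/")
--     if len(parts) != 3:
--         return False
--     try:
--         hari = int(parts[0])
--         bulan = int(parts[1])
--         tahun = int(parts[2])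
--     except ValueError:
--         return False
--     if tahun <= 0 or not (1 <= bulan <= 12):
--         return False
--     days = [31, 28, 31, 30, 31, 30, 31, 31, 30, 31, 30, 31]
--     limit = 29 if (bulan == 2 and tahun % 4 == 0) else days[bulan - 1]
--     return 1 <= hari <= limit
-- ===== Notes on version B (the rewrite author's own statement) =====
-- stated objective: simpler
-- what changed: Replaces the hand-written character-splitting loop with str.split and the nested even/odd/<=7 branch tree with a single days-in-month table lookup (February overridden to 29 in year%4==0 years).
import Mathlib
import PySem

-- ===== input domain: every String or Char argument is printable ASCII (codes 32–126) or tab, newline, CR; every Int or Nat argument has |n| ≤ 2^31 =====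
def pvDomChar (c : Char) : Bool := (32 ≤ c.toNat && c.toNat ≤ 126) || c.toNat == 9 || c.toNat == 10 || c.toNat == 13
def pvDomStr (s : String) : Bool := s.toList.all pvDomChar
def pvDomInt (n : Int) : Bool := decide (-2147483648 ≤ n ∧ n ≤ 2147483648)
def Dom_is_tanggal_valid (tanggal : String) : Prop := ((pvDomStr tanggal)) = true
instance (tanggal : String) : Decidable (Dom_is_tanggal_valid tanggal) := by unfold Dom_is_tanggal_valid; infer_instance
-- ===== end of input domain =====

-- B replaces the hand-written character-splitting loop by str.split and the nested
-- even/odd/<=7 branch tree by a days-in-month table lookup (objective: simpler).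


-- ===== PORT A =====
def is_tanggal_valid (tanggal : String) : Bool :=
  let st := tanggal.toList.foldl
    (fun (st : List Char × List (List Char)) char =>
      if char = '/' then ([], st.2 ++ [st.1]) else (st.1 ++ [char], st.2))
    ([], [])
  let array_tanggal := st.2 ++ [st.1]
  if array_tanggal.length ≠ 3 then false
  else
    match PySem.Int.ofChars? (PySem.List.pyGetD array_tanggal 0 []),
          PySem.Int.ofChars? (PySem.List.pyGetD array_tanggal 1 []),
          PySem.Int.ofChars? (PySem.List.pyGetD array_tanggal 2 []) with
    | some tanggal_input, some bulan_input, some tahun_input =>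
      let is_kabisat := decide (PySem.Int.mod tahun_input 4 = 0)
      let is_bulan_genap := decide (PySem.Int.mod bulan_input 2 = 0)
      if tahun_input ≤ 0 then false
      else if bulan_input ≤ 0 ∨ bulan_input > 12 then false
      else if is_bulan_genap then
        if bulan_input = 2 ∧ is_kabisat then
          if tanggal_input ≤ 0 ∨ tanggal_input > 29 then false else true
        else if bulan_input = 2 then
          if tanggal_input ≤ 0 ∨ tanggal_input > 28 then false else true
        else if bulan_input ≤ 7 then
          if tanggal_input ≤ 0 ∨ tanggal_input > 30 then false else true
        else
          if tanggal_input ≤ 0 ∨ tanggal_input > 31 then false else true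
      else
        if bulan_input ≤ 7 then
          if tanggal_input ≤ 0 ∨ tanggal_input > 31 then false else true
        else
          if tanggal_input ≤ 0 ∨ tanggal_input > 30 then false else true
    | _, _, _ => false

-- ===== PORT B =====
def is_tanggal_valid_alt (tanggal : String) : Bool :=
  let parts := PySem.Chars.splitOn tanggal.toList ['/']
  if parts.length ≠ 3 then false
  else
    match PySem.Int.ofChars? (PySem.List.pyGetD parts 0 []) with
    | none => false
    | some hari =>
      match PySem.Int.ofChars? (PySem.List.pyGetD parts 1 []) with
      | none => false
      | some bulan =>
        match PySem.Int.ofChars? (PySem.List.pyGetD parts 2 []) with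
        | none => false
        | some tahun =>
          if tahun ≤ 0 ∨ ¬(1 ≤ bulan ∧ bulan ≤ 12) then false
          else
            let days : List Int := [31, 28, 31, 30, 31, 30, 31, 31, 30, 31, 30, 31]
            let limit : Int :=
              if bulan = 2 ∧ PySem.Int.mod tahun 4 = 0 then 29
              else PySem.List.pyGetD days (bulan - 1) 0
            decide (1 ≤ hari ∧ hari ≤ limit)

-- ===== PRECONDITION & SPEC =====
def Spec_is_tanggal_valid (tanggal : String) (out : Bool) : Prop := out = is_tanggal_valid_alt tanggal
instance (tanggal : String) (out : Bool) : Decidable (Spec_is_tanggal_valid tanggal out) := by unfold Spec_is_tanggal_valid; infer_instance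

-- ===== CLAIM (what is proved, stated in full; the proofs are below) =====
def Claim_equal_is_tanggal_valid : Prop := ∀ (tanggal : String), Dom_is_tanggal_valid tanggal → Spec_is_tanggal_valid tanggal (is_tanggal_valid tanggal)

-- ===== LEMMAS AND PROOFS =====

/-- Reference split-on-'/' used to relate A's character loop and B's `splitOn`. -/
def pvSplit : List Char → List Char → List (List Char)
  | kata, [] => [kata]
  | kata, c :: rest => if c = '/' then kata :: pvSplit [] rest else pvSplit (kata ++ [c]) rest

theorem foldA_eq_pvSplit (cs : List Char) (kata : List Char) (arr : List (List Char)) :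
    (cs.foldl
      (fun (st : List Char × List (List Char)) char =>
        if char = '/' then ([], st.2 ++ [st.1]) else (st.1 ++ [char], st.2))
      (kata, arr)).2 ++
      [(cs.foldl
        (fun (st : List Char × List (List Char)) char =>
          if char = '/' then ([], st.2 ++ [st.1]) else (st.1 ++ [char], st.2))
        (kata, arr)).1] = arr ++ pvSplit kata cs := by
  induction cs generalizing kata arr with
  | nil => simp [pvSplit]
  | cons c rest ih =>
    by_cases hc : c = '/'
    · simp [pvSplit, hc, ih [] (arr ++ [kata])]
    · simp [pvSplit, hc, ih (kata ++ [c]) arr]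

theorem go_eq_pvSplit (l : List Char) : ∀ (fuel : Nat), l.length ≤ fuel →
    ∀ (cur : List Char) (acc : List (List Char)),
    PySem.Chars.splitOn.go ['/'] fuel l cur acc = acc.reverse ++ pvSplit cur.reverse l := by
  induction l with
  | nil =>
    intro fuel _ cur acc
    cases fuel <;> simp [PySem.Chars.splitOn.go, pvSplit]
  | cons c rest ih =>
    intro fuel hf cur acc
    cases fuel with
    | zero => simp at hf
    | succ f =>
      by_cases hc : c = '/'
      · simp [PySem.Chars.splitOn.go, List.isPrefixOf, hc, pvSplit,
          ih f (by simpa using hf) [] (cur.reverse :: acc)]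
      · have hp : ['/'].isPrefixOf (c :: rest) = false := by
          simp [List.isPrefixOf]; exact fun h => hc h.symm
        simp [PySem.Chars.splitOn.go, hp, hc, pvSplit,
          ih f (by simpa using hf) (c :: cur) acc]

theorem splitOn_eq_pvSplit (cs : List Char) :
    PySem.Chars.splitOn cs ['/'] = pvSplit [] cs := by
  simpa using go_eq_pvSplit cs (cs.length + 1) (by omega) [] []

/-- The arithmetic core: A's branch tree equals B's table lookup. -/
theorem core (d m y : Int) :
    (let is_kabisat := decide (PySem.Int.mod y 4 = 0)
     let is_bulan_genap := decide (PySem.Int.mod m 2 = 0)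
     if y ≤ 0 then false
     else if m ≤ 0 ∨ m > 12 then false
     else if is_bulan_genap then
       if m = 2 ∧ is_kabisat then
         if d ≤ 0 ∨ d > 29 then false else true
       else if m = 2 then
         if d ≤ 0 ∨ d > 28 then false else true
       else if m ≤ 7 then
         if d ≤ 0 ∨ d > 30 then false else true
       else
         if d ≤ 0 ∨ d > 31 then false else true
     else
       if m ≤ 7 then
         if d ≤ 0 ∨ d > 31 then false else true
       else
         if d ≤ 0 ∨ d > 30 then false else true) =
    (if y ≤ 0 ∨ ¬(1 ≤ m ∧ m ≤ 12) then false
     else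
       let days : List Int := [31, 28, 31, 30, 31, 30, 31, 31, 30, 31, 30, 31]
       let limit : Int :=
         if m = 2 ∧ PySem.Int.mod y 4 = 0 then 29
         else PySem.List.pyGetD days (m - 1) 0
       decide (1 ≤ d ∧ d ≤ limit)) := by
  by_cases hy : y ≤ 0
  · simp [hy]
  · by_cases hm : m ≤ 0 ∨ m > 12
    · have h' : ¬ (1 ≤ m ∧ m ≤ 12) := by omega
      simp [hm, hy, h']
    · have hm1 : 1 ≤ m := by omega
      have hm2 : m ≤ 12 := by omega
      interval_cases m <;>
        by_cases h4 : Int.fmod y 4 = 0 <;>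
          simp [hy, h4, PySem.Int.mod, PySem.List.pyGetD] <;>
            simp only [← decide_not, ← Bool.decide_and, decide_eq_decide] <;> omega

/-- The character loop's final `arr ++ [kata]`, from the empty state, is the split. -/
theorem foldTop (cs : List Char) :
    (cs.foldl
      (fun (st : List Char × List (List Char)) char =>
        if char = '/' then ([], st.2 ++ [st.1]) else (st.1 ++ [char], st.2))
      ([], [])).2 ++
      [(cs.foldl
        (fun (st : List Char × List (List Char)) char =>
          if char = '/' then ([], st.2 ++ [st.1]) else (st.1 ++ [char], st.2))
        ([], [])).1] = pvSplit [] cs := by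
  simpa using foldA_eq_pvSplit cs [] []

/-- Both validation bodies agree on any split result `L`. -/
theorem body_eq (L : List (List Char)) :
    (if L.length ≠ 3 then false
     else
       match PySem.Int.ofChars? (PySem.List.pyGetD L 0 []),
             PySem.Int.ofChars? (PySem.List.pyGetD L 1 []),
             PySem.Int.ofChars? (PySem.List.pyGetD L 2 []) with
       | some tanggal_input, some bulan_input, some tahun_input =>
         let is_kabisat := decide (PySem.Int.mod tahun_input 4 = 0)
         let is_bulan_genap := decide (PySem.Int.mod bulan_input 2 = 0)
         if tahun_input ≤ 0 then false
         else if bulan_input ≤ 0 ∨ bulan_input > 12 then false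
         else if is_bulan_genap then
           if bulan_input = 2 ∧ is_kabisat then
             if tanggal_input ≤ 0 ∨ tanggal_input > 29 then false else true
           else if bulan_input = 2 then
             if tanggal_input ≤ 0 ∨ tanggal_input > 28 then false else true
           else if bulan_input ≤ 7 then
             if tanggal_input ≤ 0 ∨ tanggal_input > 30 then false else true
           else
             if tanggal_input ≤ 0 ∨ tanggal_input > 31 then false else true
         else
           if bulan_input ≤ 7 then
             if tanggal_input ≤ 0 ∨ tanggal_input > 31 then false else true
           else
             if tanggal_input ≤ 0 ∨ tanggal_input > 30 then false else true
       | _, _, _ => false) =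
    (if L.length ≠ 3 then false
     else
       match PySem.Int.ofChars? (PySem.List.pyGetD L 0 []) with
       | none => false
       | some hari =>
         match PySem.Int.ofChars? (PySem.List.pyGetD L 1 []) with
         | none => false
         | some bulan =>
           match PySem.Int.ofChars? (PySem.List.pyGetD L 2 []) with
           | none => false
           | some tahun =>
             if tahun ≤ 0 ∨ ¬(1 ≤ bulan ∧ bulan ≤ 12) then false
             else
               let days : List Int := [31, 28, 31, 30, 31, 30, 31, 31, 30, 31, 30, 31]
               let limit : Int :=
                 if bulan = 2 ∧ PySem.Int.mod tahun 4 = 0 then 29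
                 else PySem.List.pyGetD days (bulan - 1) 0
               decide (1 ≤ hari ∧ hari ≤ limit)) := by
  by_cases h3 : L.length ≠ 3
  · rw [if_pos h3, if_pos h3]
  · rw [if_neg h3, if_neg h3]
    cases PySem.Int.ofChars? (PySem.List.pyGetD L 0 []) with
    | none => rfl
    | some d =>
      cases PySem.Int.ofChars? (PySem.List.pyGetD L 1 []) with
      | none => rfl
      | some m =>
        cases PySem.Int.ofChars? (PySem.List.pyGetD L 2 []) with
        | none => rfl
        | some y => exact core d m y

-- ===== VERDICT (by name: the statement is the Claim_ definition above) =====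
theorem is_tanggal_valid_spec : Claim_equal_is_tanggal_valid := by
  intro tanggal _
  show is_tanggal_valid tanggal = is_tanggal_valid_alt tanggal
  have hsplit : PySem.Chars.splitOn tanggal.toList ['/'] =
      (tanggal.toList.foldl
        (fun (st : List Char × List (List Char)) char =>
          if char = '/' then ([], st.2 ++ [st.1]) else (st.1 ++ [char], st.2))
        ([], [])).2 ++
        [(tanggal.toList.foldl
          (fun (st : List Char × List (List Char)) char =>
            if char = '/' then ([], st.2 ++ [st.1]) else (st.1 ++ [char], st.2))
          ([], [])).1] := by
    rw [splitOn_eq_pvSplit]; exact (foldTop tanggal.toList).symm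
  unfold is_tanggal_valid is_tanggal_valid_alt
  rw [hsplit]
  exact body_eq _
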